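-- pv_equiv track=rewrite | github.com/ogg-lab-test/LineMonsterFirm-MatchingTool-WebVer | pages/03_相性検索.py | precalc_affinity_cpg
-- ===== SOURCE A (Python) =====
-- def precalc_affinity_cpg(lis_affinities_cp):
--
--     # 子×親 + min(子×祖父, 親×祖父) + min(子×祖母, 親×祖母)の値を格納した4次元テーブル作成。
--     # dim1：祖母、dim2：祖父、dim3：親、dim4:子
--
--     # 3次元、4次元リスト作成
--     length = len(lis_affinities_cp)
--     work = [[[0 for i in range(length)] for j in range(length)] for k in range(length)]
--     lis_affinities_cpg = [[[[0 for i in range(length)] for j in range(length)] for k in range(length)] for l in range(length)]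
--
--     # 計算…min(子×祖父, 親×祖父)参照用テーブル
--     for child in range(length):
--         for parent in range(length):
--             for grand in range(length):
--                 cg = lis_affinities_cp[child][grand]
--                 pg = lis_affinities_cp[parent][grand]
--                 work[child][parent][grand] = cg if cg < pg else pg
--
--     # 実テーブル
--     for child in range(length):
--         for parent in range(length):
--             cp = lis_affinities_cp[child][parent]
--             for granpa in range(length):
--                 for granma in range(length):
--                     lis_affinities_cpg[child][parent][granpa][granma] = work[child][parent][granpa] + work[child][parent][granma] + cp
--
--     return lis_affinities_cpg
-- ===== SOURCE B (Python) =====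
-- def precalc_affinity_cpg(lis_affinities_cp):
--     # Symmetry-halving: the min-row and its base-free outer-sum grid depend only on the
--     # UNORDERED pair {c,p}, so compute each once in a triangular store, then derive every
--     # ordered (c,p) plane by shifting the shared grid with the scalar base cp[c][p].
--     cp = lis_affinities_cp
--     n = len(cp)
--
--     def make_grid(i, j):
--         mins = [min(cp[i][g], cp[j][g]) for g in range(n)]
--         return [[a + b for b in mins] for a in mins]
--
--     tri = [[make_grid(i, i + k) for k in range(n - i)] for i in range(n)]
--
--     def grid0(c, p):
--         return tri[c][p - c] if c <= p else tri[p][c - p]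
--
--     return [[[[v + cp[c][p] for v in row] for row in grid0(c, p)]
--              for p in range(n)] for c in range(n)]
-- ===== Notes on version B (the rewrite author's own statement) =====
-- stated objective: alternative
-- what changed: A builds a 3D ordered memo table then a 4D combine pass; B exploits the c/p symmetry of the min-row: it computes one base-free outer-sum grid per UNORDERED pair {c,p} in a triangular store and derives each ordered plane by a scalar shift with cp[c][p], halving the min/outer-sum work.
import Mathlib
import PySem

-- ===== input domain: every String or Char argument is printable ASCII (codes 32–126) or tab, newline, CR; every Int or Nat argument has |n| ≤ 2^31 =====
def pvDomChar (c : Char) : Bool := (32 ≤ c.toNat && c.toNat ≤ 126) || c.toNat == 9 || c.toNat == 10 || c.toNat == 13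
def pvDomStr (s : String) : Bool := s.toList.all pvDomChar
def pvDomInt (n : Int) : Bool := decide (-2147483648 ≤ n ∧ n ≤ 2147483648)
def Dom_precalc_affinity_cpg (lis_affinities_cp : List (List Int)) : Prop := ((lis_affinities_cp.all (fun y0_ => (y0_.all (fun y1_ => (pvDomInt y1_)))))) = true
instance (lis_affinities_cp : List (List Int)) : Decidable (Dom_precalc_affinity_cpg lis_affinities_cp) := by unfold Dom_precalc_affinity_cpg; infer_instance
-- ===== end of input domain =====

-- B replaces A's ordered 3D memo + 4D combine by one base-free outer-sum grid per
-- UNORDERED pair {c,p} (triangular store), each ordered plane derived by a scalar shift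
-- with cp[c][p] (objective: alternative decomposition exploiting the c/p symmetry).

-- ===== PORT A =====
-- indexing helper lis[i][j]; on Pre_ the indices are always in range, so getD's default is never used
def pvGet2 (lis : List (List Int)) (i j : Nat) : Int := (lis.getD i []).getD j 0

-- work[c][p][g] lookup
def pvGet3 (w : List (List (List Int))) (c p g : Nat) : Int := ((w.getD c []).getD p []).getD g 0

def precalc_affinity_cpg (lis_affinities_cp : List (List Int)) : List (List (List (List Int))) :=
  let length := lis_affinities_cp.length
  -- first pass: the 3D memo table work[child][parent][grand] = cg if cg < pg else pg
  let work : List (List (List Int)) :=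
    (List.range length).map (fun child =>
      (List.range length).map (fun parent =>
        (List.range length).map (fun grand =>
          let cg := pvGet2 lis_affinities_cp child grand
          let pg := pvGet2 lis_affinities_cp parent grand
          if cg < pg then cg else pg)))
  -- second pass: the 4D table, reading the memo table
  (List.range length).map (fun child =>
    (List.range length).map (fun parent =>
      let cp := pvGet2 lis_affinities_cp child parent
      (List.range length).map (fun granpa =>
        (List.range length).map (fun granma =>
          pvGet3 work child parent granpa + pvGet3 work child parent granma + cp))))

-- ===== PORT B =====
-- make_grid: min-row of the pair (i,j), then its base-free outer-sum grid
def pvMakeGrid (cp : List (List Int)) (n i j : Nat) : List (List Int) :=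
  let mins := (List.range n).map (fun g => min (pvGet2 cp i g) (pvGet2 cp j g))
  mins.map (fun a => mins.map (fun b => a + b))

def precalc_affinity_cpg_alt (lis_affinities_cp : List (List Int)) : List (List (List (List Int))) :=
  let n := lis_affinities_cp.length
  -- triangular store: tri[i][k] is the shared grid of the unordered pair {i, i+k}
  let tri : List (List (List (List Int))) :=
    (List.range n).map (fun i => (List.range (n - i)).map (fun k => pvMakeGrid lis_affinities_cp n i (i + k)))
  let grid0 := fun (c p : Nat) =>
    if c ≤ p then (tri.getD c []).getD (p - c) [] else (tri.getD p []).getD (c - p) []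
  (List.range n).map (fun c =>
    (List.range n).map (fun p =>
      (grid0 c p).map (fun row => row.map (fun v => v + pvGet2 lis_affinities_cp c p))))

-- ===== PRECONDITION & SPEC =====
-- A indexes every row at all positions 0..len-1, so it raises IndexError when some row is
-- shorter than the outer list; Pre_ admits exactly the inputs where every row is long enough.
def Pre_precalc_affinity_cpg (lis_affinities_cp : List (List Int)) : Prop :=
  ∀ row ∈ lis_affinities_cp, lis_affinities_cp.length ≤ row.length
instance (lis_affinities_cp : List (List Int)) : Decidable (Pre_precalc_affinity_cpg lis_affinities_cp) := by unfold Pre_precalc_affinity_cpg; infer_instance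

def pvWitness_precalc_affinity_cpg : List (List Int) := [[1, 2], [3, 4]]

def Spec_precalc_affinity_cpg (lis_affinities_cp : List (List Int)) (out : List (List (List (List Int)))) : Prop := out = precalc_affinity_cpg_alt lis_affinities_cp
instance (lis_affinities_cp : List (List Int)) (out : List (List (List (List Int)))) : Decidable (Spec_precalc_affinity_cpg lis_affinities_cp out) := by unfold Spec_precalc_affinity_cpg; infer_instance

-- ===== CLAIM (what is proved, stated in full; the proofs are below) =====
def Claim_equal_precalc_affinity_cpg : Prop := ∀ (lis_affinities_cp : List (List Int)), Dom_precalc_affinity_cpg lis_affinities_cp → Pre_precalc_affinity_cpg lis_affinities_cp → Spec_precalc_affinity_cpg lis_affinities_cp (precalc_affinity_cpg lis_affinities_cp)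

-- ===== LEMMAS AND PROOFS =====
theorem pv_getD_map_range {α : Type} (n i : Nat) (f : Nat → α) (d : α) (h : i < n) :
    (((List.range n).map f).getD i d) = f i := by
  rw [List.getD_eq_getElem?_getD]
  simp [h]

-- the memo-table lookup equals the direct min
theorem pv_work_lookup (lis : List (List Int)) (n c p g : Nat)
    (hc : c < n) (hp : p < n) (hg : g < n) :
    pvGet3 ((List.range n).map (fun child =>
      (List.range n).map (fun parent =>
        (List.range n).map (fun grand =>
          let cg := pvGet2 lis child grand
          let pg := pvGet2 lis parent grand
          if cg < pg then cg else pg)))) c p g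
    = min (pvGet2 lis c g) (pvGet2 lis p g) := by
  unfold pvGet3
  rw [pv_getD_map_range _ _ _ _ hc, pv_getD_map_range _ _ _ _ hp, pv_getD_map_range _ _ _ _ hg]
  have := min_def (pvGet2 lis c g) (pvGet2 lis p g)
  simp only [this]
  split_ifs <;> omega

-- the triangular-store lookup yields make_grid of the ordered version of the pair
theorem pv_tri_lookup (lis : List (List Int)) (n c p : Nat) (hcp : c ≤ p) (hp : p < n) :
    ((((List.range n).map (fun i => (List.range (n - i)).map (fun k =>
        pvMakeGrid lis n i (i + k)))).getD c []).getD (p - c) [])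
    = pvMakeGrid lis n c p := by
  rw [pv_getD_map_range _ _ _ _ (lt_of_le_of_lt hcp hp),
      pv_getD_map_range _ _ _ _ (by omega : p - c < n - c)]
  congr 1
  omega

-- ===== VERDICT (by name: the statement is the Claim_ definition above) =====
theorem precalc_affinity_cpg_spec : Claim_equal_precalc_affinity_cpg := by
  intro lis _ _
  unfold Spec_precalc_affinity_cpg precalc_affinity_cpg precalc_affinity_cpg_alt
  apply List.map_congr_left
  intro c hc
  apply List.map_congr_left
  intro p hp
  rw [List.mem_range] at hc hp
  have hgrid : (if c ≤ p
      then ((((List.range lis.length).map (fun i => (List.range (lis.length - i)).map (fun k =>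
        pvMakeGrid lis lis.length i (i + k)))).getD c []).getD (p - c) [])
      else ((((List.range lis.length).map (fun i => (List.range (lis.length - i)).map (fun k =>
        pvMakeGrid lis lis.length i (i + k)))).getD p []).getD (c - p) []))
      = pvMakeGrid lis lis.length c p := by
    split_ifs with h
    · exact pv_tri_lookup lis _ c p h hp
    · rw [pv_tri_lookup lis _ p c (by omega) hc]
      unfold pvMakeGrid
      simp only [min_comm (pvGet2 lis p _) (pvGet2 lis c _)]
  simp only [hgrid]
  unfold pvMakeGrid
  simp only [List.map_map]
  apply List.map_congr_left
  intro gp hgp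
  simp only [Function.comp, List.map_map]
  apply List.map_congr_left
  intro gm hgm
  rw [List.mem_range] at hgp hgm
  rw [pv_work_lookup _ _ _ _ _ hc hp hgp, pv_work_lookup _ _ _ _ _ hc hp hgm]
  rfl
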